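-- pv_equiv track=rewrite | github.com/ridwanmonjur/mirror-og | cloud_server_functions/main.py | calc_scores
-- ===== SOURCE A (Python) =====
-- def calc_scores(real_winners):
--     """Calculate scores from real winners array"""
--     score1 = 0
--     score2 = 0
--
--     for value in real_winners:
--         if value is None:
--             continue
--         if value == '1':
--             score1 += 1
--         else:
--             score2 += 1
--
--     return [score1, score2]
-- ===== SOURCE B (Python) =====
-- def calc_scores(real_winners):
--     """Calculate scores from real winners array"""
--     def go(lo, hi):
--         # counts ('1's, other non-None values) in real_winners[lo:hi] by divide and conquer
--         if hi <= lo: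
--             return (0, 0)
--         if hi - lo == 1:
--             v = real_winners[lo]
--             if v is None:
--                 return (0, 0)
--             return (1, 0) if v == '1' else (0, 1)
--         mid = (lo + hi) // 2
--         a1, a2 = go(lo, mid)
--         b1, b2 = go(mid, hi)
--         return (a1 + b1, a2 + b2)
--     s1, s2 = go(0, len(real_winners))
--     return [s1, s2]
-- ===== Notes on version B (the rewrite author's own statement) =====
-- stated objective: alternative
-- what changed: Replaces the single linear pass with two accumulators by a divide-and-conquer recursion over index ranges that computes count pairs for each half and sums them, exploiting that the counts are a monoid homomorphism over list concatenation.
import Mathlib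
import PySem

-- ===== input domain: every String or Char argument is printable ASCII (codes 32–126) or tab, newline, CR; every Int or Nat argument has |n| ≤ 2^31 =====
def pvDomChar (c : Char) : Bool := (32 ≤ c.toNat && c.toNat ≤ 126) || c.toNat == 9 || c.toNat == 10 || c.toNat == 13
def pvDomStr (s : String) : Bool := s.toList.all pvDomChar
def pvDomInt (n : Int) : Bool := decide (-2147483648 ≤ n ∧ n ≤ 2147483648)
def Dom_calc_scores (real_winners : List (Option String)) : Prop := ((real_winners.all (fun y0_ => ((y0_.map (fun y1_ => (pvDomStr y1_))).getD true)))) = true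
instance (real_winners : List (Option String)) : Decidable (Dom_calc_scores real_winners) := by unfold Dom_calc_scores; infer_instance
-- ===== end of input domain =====

-- B replaces the two-accumulator linear loop by a divide-and-conquer recursion over index
-- ranges that sums the count pairs of the two halves (objective: alternative); same return value.

-- ===== PORT A =====
def calc_scores (real_winners : List (Option String)) : List Int :=
  let p := real_winners.foldl (fun (st : Int × Int) value =>
    match value with
    | none => st
    | some v => if v = "1" then (st.1 + 1, st.2) else (st.1, st.2 + 1)) (0, 0)
  [p.1, p.2]

-- ===== PORT B =====
-- 'go' of Source B; the 'none' fallback of pyGet? is unreachable (go is only called with 0 ≤ lo < hi ≤ len)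
def calcGo (rw : List (Option String)) (lo hi : Int) : Int × Int :=
  if hi ≤ lo then (0, 0)
  else if hi - lo = 1 then
    match PySem.List.pyGet? rw lo with
    | none => (0, 0)
    | some none => (0, 0)
    | some (some v) => if v = "1" then (1, 0) else (0, 1)
  else
    let mid := PySem.Int.floordiv (lo + hi) 2
    let a := calcGo rw lo mid
    let b := calcGo rw mid hi
    (a.1 + b.1, a.2 + b.2)
termination_by (hi - lo).toNat
decreasing_by
  · have h := PySem.Int.floordiv_mul_add_mod (lo + hi) 2
    have h2 := PySem.Int.mod_two_eq (lo + hi)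
    omega
  · have h := PySem.Int.floordiv_mul_add_mod (lo + hi) 2
    have h2 := PySem.Int.mod_two_eq (lo + hi)
    omega

def calc_scores_alt (real_winners : List (Option String)) : List Int :=
  let s := calcGo real_winners 0 (real_winners.length : Int)
  [s.1, s.2]

-- ===== PRECONDITION & SPEC =====
def Spec_calc_scores (real_winners : List (Option String)) (out : List Int) : Prop := out = calc_scores_alt real_winners
instance (real_winners : List (Option String)) (out : List Int) : Decidable (Spec_calc_scores real_winners out) := by unfold Spec_calc_scores; infer_instance

-- ===== CLAIM (what is proved, stated in full; the proofs are below) =====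
def Claim_equal_calc_scores : Prop := ∀ (real_winners : List (Option String)), Dom_calc_scores real_winners → Spec_calc_scores real_winners (calc_scores real_winners)

-- ===== LEMMAS AND PROOFS =====

-- the count pair of a list segment, as both programs compute it
def cntPair (l : List (Option String)) : Int × Int :=
  ((l.countP (· = some "1") : Int), (l.countP (fun x => x ≠ none ∧ x ≠ some "1") : Int))

lemma cntPair_append (l m : List (Option String)) :
    cntPair (l ++ m) = ((cntPair l).1 + (cntPair m).1, (cntPair l).2 + (cntPair m).2) := by
  simp [cntPair, List.countP_append]

lemma calc_scores_fold (l : List (Option String)) (a b : Int) :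
    l.foldl (fun (st : Int × Int) value =>
      match value with
      | none => st
      | some v => if v = "1" then (st.1 + 1, st.2) else (st.1, st.2 + 1)) (a, b)
    = (a + (cntPair l).1, b + (cntPair l).2) := by
  induction l generalizing a b with
  | nil => simp [cntPair]
  | cons h t ih =>
    cases h with
    | none => simp [List.foldl, ih, cntPair]
    | some v =>
      by_cases hv : v = "1"
      · simp [List.foldl, ih, hv, cntPair]
        omega
      · simp [List.foldl, ih, hv, cntPair]
        omega

lemma seg_one (rw : List (Option String)) (lo : Int) (hlt : lo.toNat < rw.length) :
    (rw.drop lo.toNat).take 1 = [rw[lo.toNat]] := by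
  rw [List.take_one, List.head?_drop]
  simp [List.getElem?_eq_getElem hlt]

lemma calcGo_eq_cntPair (rw : List (Option String)) (lo hi : Int) :
    0 ≤ lo → lo ≤ hi → hi ≤ (rw.length : Int) →
    calcGo rw lo hi = cntPair ((rw.drop lo.toNat).take (hi - lo).toNat) := by
  induction lo, hi using calcGo.induct rw with
  | case1 lo hi hba =>
    intro h0 hle hlen
    rw [calcGo]
    simp only [if_pos hba]
    have : (hi - lo).toNat = 0 := by omega
    simp [this, cntPair]
  | case2 lo hi hba h1 hget =>
    intro h0 hle hlen
    rw [PySem.List.pyGet?_eq_some_getElem rw h0 (by omega)] at hget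
    exact absurd hget (by simp)
  | case3 lo hi hba h1 hget =>
    intro h0 hle hlen
    have hlt : lo.toNat < rw.length := by omega
    have hv : rw[lo.toNat] = none := by
      rw [PySem.List.pyGet?_eq_some_getElem rw h0 (by omega)] at hget
      exact (Option.some_injective _ hget).symm ▸ rfl
    rw [calcGo]
    simp only [if_neg hba, if_pos h1, hget]
    have htake : (hi - lo).toNat = 1 := by omega
    rw [htake, seg_one rw lo hlt, hv]
    simp [cntPair]
  | case4 lo hi hba h1 hget =>
    intro h0 hle hlen
    have hlt : lo.toNat < rw.length := by omega
    have hv : rw[lo.toNat] = some "1" := by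
      rw [PySem.List.pyGet?_eq_some_getElem rw h0 (by omega)] at hget
      exact (Option.some_injective _ hget).symm ▸ rfl
    rw [calcGo]
    simp only [if_neg hba, if_pos h1, hget]
    have htake : (hi - lo).toNat = 1 := by omega
    rw [htake, seg_one rw lo hlt, hv]
    simp [cntPair]
  | case5 lo hi hba h1 v hget hv1 =>
    intro h0 hle hlen
    have hlt : lo.toNat < rw.length := by omega
    have hv : rw[lo.toNat] = some v := by
      rw [PySem.List.pyGet?_eq_some_getElem rw h0 (by omega)] at hget
      exact (Option.some_injective _ hget).symm ▸ rfl
    rw [calcGo]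
    simp only [if_neg hba, if_pos h1, hget]
    have htake : (hi - lo).toNat = 1 := by omega
    rw [htake, seg_one rw lo hlt, hv]
    simp [cntPair, hv1]
  | case6 lo hi hba h1 mid iha ihb =>
    intro h0 hle hlen
    have hmd : mid = PySem.Int.floordiv (lo + hi) 2 := rfl
    rw [hmd] at iha ihb
    clear hmd
    have hm := PySem.Int.floordiv_mul_add_mod (lo + hi) 2
    have hm2 := PySem.Int.mod_two_eq (lo + hi)
    have hmid1 : lo ≤ PySem.Int.floordiv (lo + hi) 2 := by omega
    have hmid2 : PySem.Int.floordiv (lo + hi) 2 ≤ hi := by omega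
    rw [calcGo]
    simp only [if_neg hba, if_neg h1]
    rw [iha h0 hmid1 (by omega), ihb (by omega) hmid2 hlen]
    have hsplit : (rw.drop lo.toNat).take (hi - lo).toNat
        = (rw.drop lo.toNat).take (PySem.Int.floordiv (lo + hi) 2 - lo).toNat
          ++ (rw.drop (PySem.Int.floordiv (lo + hi) 2).toNat).take (hi - PySem.Int.floordiv (lo + hi) 2).toNat := by
      have h3 : (hi - lo).toNat = (PySem.Int.floordiv (lo + hi) 2 - lo).toNat + (hi - PySem.Int.floordiv (lo + hi) 2).toNat := by omega
      have h4 : lo.toNat + (PySem.Int.floordiv (lo + hi) 2 - lo).toNat = (PySem.Int.floordiv (lo + hi) 2).toNat := by omega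
      rw [h3, List.take_add, List.drop_drop, h4]
    rw [hsplit, cntPair_append]

-- ===== VERDICT (by name: the statement is the Claim_ definition above) =====
theorem calc_scores_spec : Claim_equal_calc_scores := by
  intro rw _
  unfold Spec_calc_scores calc_scores calc_scores_alt
  rw [calc_scores_fold, calcGo_eq_cntPair rw 0 rw.length (by omega) (by omega) (by omega)]
  simp
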